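-- pv_equiv track=rewrite | github.com/oskar456/walk_dotsk_ds | walk_dotsk_ds.py | _next_odict_item
-- ===== SOURCE A (Python) =====
-- def _next_odict_item(d, key):
--     i = iter(d.items())
--     for k, v in i:
--         if k == key:
--             try:
--                 return next(i)
--             except StopIteration:
--                 return next(iter(d.items()))
-- ===== SOURCE B (Python) =====
-- def _next_odict_item(d, key):
--     items = list(d.items())
--     succ = dict(zip(d, items[1:] + items[:1]))
--     return succ.get(key)
-- ===== Notes on version B (the rewrite author's own statement) =====
-- stated objective: alternative
-- what changed: Instead of scanning with an iterator and catching StopIteration to wrap, B builds a cyclic-successor dictionary in one shot by zipping the keys with the items list rotated left by one, and answers with a single dict lookup.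
import Mathlib
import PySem

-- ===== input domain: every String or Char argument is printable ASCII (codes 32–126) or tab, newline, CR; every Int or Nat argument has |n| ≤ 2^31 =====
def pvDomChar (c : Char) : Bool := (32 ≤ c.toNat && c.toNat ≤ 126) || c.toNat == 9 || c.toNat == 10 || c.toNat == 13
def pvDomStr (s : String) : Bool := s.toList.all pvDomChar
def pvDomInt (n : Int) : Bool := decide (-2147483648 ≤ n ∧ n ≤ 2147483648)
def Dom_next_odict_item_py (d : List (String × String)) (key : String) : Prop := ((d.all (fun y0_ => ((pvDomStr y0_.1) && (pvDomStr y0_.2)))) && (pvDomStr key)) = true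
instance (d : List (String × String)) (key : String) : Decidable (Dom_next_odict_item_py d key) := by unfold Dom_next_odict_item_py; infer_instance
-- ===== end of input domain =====

-- B replaces A's iterator scan with StopIteration wrap-around by building a
-- cyclic-successor dictionary (keys zipped with the items list rotated left by
-- one) and answering with a single dict lookup. Return-value equivalence only;
-- neither version mutates d.

-- ===== PORT A =====
-- the for-loop over the items iterator: on a match, 'next(i)' is the head of the
-- remaining suffix; on StopIteration (suffix empty), 'next(iter(d.items()))' is
-- the first item (the loop ran, so items is nonempty and head? is some)
def pvLoopA (full : List (String × String)) (key : String) : List (String × String) → Option (String × String)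
  | [] => none
  | (k, _v) :: rest =>
    if k == key then
      match rest with
      | nxt :: _ => some nxt
      | [] => full.head?
    else pvLoopA full key rest

def next_odict_item_py (d : List (String × String)) (key : String) : Option (String × String) :=
  let items := (PySem.Dict.ofList d).items   -- d is a Python dict built from the pairs
  pvLoopA items key items

-- ===== PORT B =====
-- items = list(d.items()); succ = dict(zip(d, items[1:] + items[:1])); return succ.get(key)
-- (iterating a dict yields its keys; items[1:] + items[:1] is the left rotation)
def next_odict_item_py_alt (d : List (String × String)) (key : String) : Option (String × String) :=
  let items := (PySem.Dict.ofList d).items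
  let succ := PySem.Dict.ofList (((PySem.Dict.ofList d).keys).zip (PySem.List.slice items (some 1) ++ PySem.List.slice items none (some 1)))
  succ.get? key

-- ===== PRECONDITION & SPEC =====
def Spec_next_odict_item_py (d : List (String × String)) (key : String) (out : Option (String × String)) : Prop := out = next_odict_item_py_alt d key
instance (d : List (String × String)) (key : String) (out : Option (String × String)) : Decidable (Spec_next_odict_item_py d key out) := by unfold Spec_next_odict_item_py; infer_instance

-- ===== CLAIM (what is proved, stated in full; the proofs are below) =====
def Claim_equal_next_odict_item_py : Prop := ∀ (d : List (String × String)) (key : String), Dom_next_odict_item_py d key → Spec_next_odict_item_py d key (next_odict_item_py d key)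

-- ===== LEMMAS AND PROOFS =====

-- a Dict built from pairs with distinct keys has exactly those pairs as items
theorem ofList_items_of_nodup {ν : Type} (ps : List (String × ν)) (h : (ps.map Prod.fst).Nodup) :
    (PySem.Dict.ofList ps).items = ps := by
  have := PySem.Dict.items_foldl_insert_fresh ps Prod.fst Prod.snd PySem.Dict.empty
    (by simp [PySem.Dict.contains_empty]) h
  simpa [PySem.Dict.ofList, PySem.Dict.update, PySem.Dict.items] using this

-- the core invariant: A's iterator loop over a suffix 'tail' of 'full' equals a
-- first-match lookup in the zip of tail's keys with the corresponding slice of the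
-- left rotation of full (tail minus its head, then full's first item)
theorem pvLoopA_eq_zip_lookup (full : List (String × String)) (key : String) :
    ∀ tail : List (String × String), (tail = [] ∨ full ≠ []) →
      pvLoopA full key tail =
        (PySem.Dict.mk ((tail.map Prod.fst).zip (tail.drop 1 ++ full.take 1))).get? key := by
  intro tail
  induction tail with
  | nil => intro _; rfl
  | cons hd rest ih =>
    intro h
    have hfull : full ≠ [] := by
      rcases h with h | h
      · exact absurd h (by simp)
      · exact h
    obtain ⟨f0, ftl, rfl⟩ : ∃ a l, full = a :: l := by
      cases full with
      | nil => exact absurd rfl hfull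
      | cons a l => exact ⟨a, l, rfl⟩
    obtain ⟨k, v⟩ := hd
    cases rest with
    | nil =>
      simp only [pvLoopA, List.map, List.drop, List.take, List.nil_append, List.zip,
        List.zipWith, PySem.Dict.get?_mk_cons]
      by_cases hk : (k == key) = true
      · simp [hk, List.head?]
      · simp [hk, PySem.Dict.get?]
    | cons p rs =>
      simp only [pvLoopA, List.map, List.drop_one, List.tail, List.cons_append,
        List.zip_cons_cons, PySem.Dict.get?_mk_cons]
      by_cases hk : (k == key) = true
      · simp [hk]
      · simp only [hk]
        have := ih (Or.inr (by simp))
        simpa [pvLoopA, List.drop_one] using this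

-- ===== VERDICT (by name: the statement is the Claim_ definition above) =====
theorem next_odict_item_py_spec : Claim_equal_next_odict_item_py := by
  intro d key _
  unfold Spec_next_odict_item_py next_odict_item_py next_odict_item_py_alt
  simp only []
  set its := (PySem.Dict.ofList d).items with hits
  have hkeys : (PySem.Dict.ofList d).keys = its.map Prod.fst := rfl
  have hnd : (its.map Prod.fst).Nodup := by
    rw [← hkeys]; exact PySem.Dict.nodup_keys_ofList d
  have hslice1 : PySem.List.slice its (some 1) = its.drop 1 := by
    simpa using PySem.List.slice_from its (a := 1) (by norm_num)
  have hslice01 : PySem.List.slice its none (some 1) = its.take 1 := by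
    simpa using PySem.List.slice_to its (b := 1) (by norm_num)
  have hzipnd : (((its.map Prod.fst).zip (its.drop 1 ++ its.take 1)).map Prod.fst).Nodup := by
    rcases its with _ | ⟨a, l⟩
    · simp
    · rw [List.map_fst_zip]
      · exact hnd
      · simp
  rw [hkeys, hslice1, hslice01]
  have hdict : PySem.Dict.ofList ((its.map Prod.fst).zip (its.drop 1 ++ its.take 1)) =
      PySem.Dict.mk ((its.map Prod.fst).zip (its.drop 1 ++ its.take 1)) :=
    PySem.Dict.ext (ofList_items_of_nodup _ hzipnd)
  rw [hdict]
  cases its with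
  | nil => rfl
  | cons a l => exact pvLoopA_eq_zip_lookup (a :: l) key (a :: l) (Or.inr (by simp))
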